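-- pv_equiv track=rewrite | github.com/vaishu567/dsapracrepo | Python/recursion/recursion.py | callingrecu
-- ===== SOURCE A (Python) =====
-- def callingrecu(s,i,maxi,mini,ans,sign):
--     if i>=len(s) or s[i].isnumeric()==False:
--         return sign*ans
--     ans=ans*10+(ord(s[i])-ord('0'))
--     if sign==1 and (sign*ans)>=maxi:
--         return maxi
--     if sign==-1 and (sign*ans)<=mini:
--         return mini
--     final=callingrecu(s,i+1,maxi,mini,ans,sign)
--     return final
-- ===== SOURCE B (Python) =====
-- def callingrecu(s, i, maxi, mini, ans, sign):
--     # same value as A, computed in two phases instead of recursion: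
--     # phase 1 collects the digit run, phase 2 folds it with the clamp guards
--     n = len(s)
--     digits = []
--     j = i
--     while j < n and s[j].isdigit():
--         digits.append(ord(s[j]) - ord('0'))
--         j += 1
--     total = ans
--     for d in digits:
--         total = total * 10 + d
--         if sign == 1 and total >= maxi:
--             return maxi
--         if sign == -1 and -total <= mini:
--             return mini
--     return sign * total
-- ===== Notes on version B (the rewrite author's own statement) =====
-- stated objective: simpler
-- what changed: Replaces the tail recursion threading (i, ans) with two phases: an iterative collection of the digit run into a list, then a plain for-loop fold with the clamp guards.
import Mathlib
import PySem

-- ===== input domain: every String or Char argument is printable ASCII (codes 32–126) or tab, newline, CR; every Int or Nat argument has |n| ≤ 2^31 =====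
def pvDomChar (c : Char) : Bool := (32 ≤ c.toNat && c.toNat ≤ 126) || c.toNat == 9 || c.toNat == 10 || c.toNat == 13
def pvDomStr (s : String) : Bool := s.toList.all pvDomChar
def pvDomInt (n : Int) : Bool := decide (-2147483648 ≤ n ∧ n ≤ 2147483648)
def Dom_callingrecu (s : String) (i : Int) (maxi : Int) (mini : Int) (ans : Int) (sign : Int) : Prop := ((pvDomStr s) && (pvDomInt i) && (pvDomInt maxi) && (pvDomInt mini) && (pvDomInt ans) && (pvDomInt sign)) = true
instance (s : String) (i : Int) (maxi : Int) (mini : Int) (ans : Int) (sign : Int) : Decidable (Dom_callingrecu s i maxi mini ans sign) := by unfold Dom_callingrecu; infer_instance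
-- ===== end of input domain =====

-- B replaces A's tail recursion by two phases — collect the digit run, then fold it with the clamp guards — for clarity (no speed claim).

-- ===== PORT A =====
-- lemma the port's termination proof cites: a successful s[i] means i < len(s)
theorem pv_pyGet?_some_lt (s : String) (i : Int) (c : Char)
    (h : PySem.Str.pyGet? s i = some c) : i < (s.length : Int) := by
  have hn := h
  simp only [PySem.Str.pyGet?_eq, PySem.Chars.pyGet?_eq_listPyGet?] at hn
  rcases Decidable.em (PySem.Raise.InRange s.toList.length i) with hr | hr
  · simp only [PySem.Raise.InRange, String.length_toList] at hr; omega
  · rw [← PySem.List.pyGet?_eq_none_iff] at hr; rw [hr] at hn; simp at hn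

-- literal port of A; `s[i].isnumeric()` is exact as Chars.isdigit on the ASCII domain;
-- where Python raises IndexError (i < -len(s), excluded by Pre_) pyGet? is none and we return sign*ans
def callingrecu (s : String) (i : Int) (maxi : Int) (mini : Int) (ans : Int) (sign : Int) : Int :=
  match h : PySem.Str.pyGet? s i with
  | none => sign * ans            -- i >= len(s): first guard fires
  | some c =>
    if PySem.Chars.isdigit c = false then sign * ans
    else
      let ans2 := ans * 10 + ((c.toNat : Int) - 48)
      if sign = 1 ∧ sign * ans2 ≥ maxi then maxi
      else if sign = -1 ∧ sign * ans2 ≤ mini then mini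
      else callingrecu s (i + 1) maxi mini ans2 sign
termination_by ((s.length : Int) - i).toNat
decreasing_by
  have := pv_pyGet?_some_lt s i c h; omega

-- ===== PORT B =====
-- phase 1 of Source B: the while loop collecting the digit run as values (n = len(s))
def collectDigits (s : String) (j : Int) : List Int :=
  if hj : j < (s.length : Int) then
    match PySem.Str.pyGet? s j with
    | some c =>
      if PySem.Chars.isdigit c then ((c.toNat : Int) - 48) :: collectDigits s (j + 1)
      else []
    | none => []                  -- j < -len(s): IndexError in Python too, excluded by Pre_
  else []
termination_by ((s.length : Int) - j).toNat
decreasing_by omega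

-- phase 2 of Source B: the for-loop fold with the clamp guards
def clampLoop (digits : List Int) (maxi : Int) (mini : Int) (sign : Int) (total : Int) : Int :=
  match digits with
  | [] => sign * total
  | d :: rest =>
    let t := total * 10 + d
    if sign = 1 ∧ t ≥ maxi then maxi
    else if sign = -1 ∧ -t ≤ mini then mini
    else clampLoop rest maxi mini sign t

def callingrecu_alt (s : String) (i : Int) (maxi : Int) (mini : Int) (ans : Int) (sign : Int) : Int :=
  clampLoop (collectDigits s i) maxi mini sign ans

-- ===== PRECONDITION & SPEC =====
-- Pre_ excludes exactly the inputs where A raises IndexError: i below -len(s) (B raises there too)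
def Pre_callingrecu (s : String) (i : Int) (maxi : Int) (mini : Int) (ans : Int) (sign : Int) : Prop :=
  -(s.length : Int) ≤ i
instance (s : String) (i : Int) (maxi : Int) (mini : Int) (ans : Int) (sign : Int) : Decidable (Pre_callingrecu s i maxi mini ans sign) := by unfold Pre_callingrecu; infer_instance
def pvWitness_callingrecu : String × Int × Int × Int × Int × Int := ("123a", 0, 2147483647, -2147483648, 0, 1)

def Spec_callingrecu (s : String) (i : Int) (maxi : Int) (mini : Int) (ans : Int) (sign : Int) (out : Int) : Prop := out = callingrecu_alt s i maxi mini ans sign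
instance (s : String) (i : Int) (maxi : Int) (mini : Int) (ans : Int) (sign : Int) (out : Int) : Decidable (Spec_callingrecu s i maxi mini ans sign out) := by unfold Spec_callingrecu; infer_instance

-- ===== CLAIM (what is proved, stated in full; the proofs are below) =====
def Claim_equal_callingrecu : Prop := ∀ (s : String) (i : Int) (maxi : Int) (mini : Int) (ans : Int) (sign : Int), Dom_callingrecu s i maxi mini ans sign → Pre_callingrecu s i maxi mini ans sign → Spec_callingrecu s i maxi mini ans sign (callingrecu s i maxi mini ans sign)

-- ===== LEMMAS AND PROOFS =====
theorem pv_main (s : String) (i maxi mini ans sign : Int) (hpre : -(s.length : Int) ≤ i) :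
    callingrecu s i maxi mini ans sign = clampLoop (collectDigits s i) maxi mini sign ans := by
  fun_induction callingrecu s i maxi mini ans sign with
  | case1 i ans h =>
    have hi : ¬ i < (s.length : Int) := by
      have hn := h
      simp only [PySem.Str.pyGet?_eq, PySem.Chars.pyGet?_eq_listPyGet?] at hn
      rw [PySem.List.pyGet?_eq_none_iff] at hn
      simp only [PySem.Raise.InRange, String.length_toList] at hn
      omega
    rw [collectDigits, dif_neg hi]
    simp [clampLoop]
  | case2 i ans c h hnd =>
    have hi : i < (s.length : Int) := pv_pyGet?_some_lt s i c h
    rw [collectDigits, dif_pos hi, h]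
    simp [hnd, clampLoop]
  | case3 i ans c h hd ans2 hg1 =>
    have hi : i < (s.length : Int) := pv_pyGet?_some_lt s i c h
    have hd' : PySem.Chars.isdigit c = true := by revert hd; cases PySem.Chars.isdigit c <;> simp
    rw [collectDigits, dif_pos hi, h]
    simp only [hd', if_true]
    rw [clampLoop]
    obtain ⟨hs1, hge⟩ := hg1
    have hA : ans2 = ans * 10 + ((c.toNat : Int) - 48) := rfl
    subst hs1
    rw [if_pos ⟨rfl, by omega⟩]
  | case4 i ans c h hd ans2 hg1 hg2 =>
    have hi : i < (s.length : Int) := pv_pyGet?_some_lt s i c h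
    have hd' : PySem.Chars.isdigit c = true := by revert hd; cases PySem.Chars.isdigit c <;> simp
    rw [collectDigits, dif_pos hi, h]
    simp only [hd', if_true]
    rw [clampLoop]
    obtain ⟨hs2, hle⟩ := hg2
    have hA : ans2 = ans * 10 + ((c.toNat : Int) - 48) := rfl
    subst hs2
    rw [if_neg (by rintro ⟨h1, -⟩; omega), if_pos ⟨rfl, by omega⟩]
  | case5 i ans c h hd ans2 hg1 hg2 ih =>
    have hi : i < (s.length : Int) := pv_pyGet?_some_lt s i c h
    have hd' : PySem.Chars.isdigit c = true := by revert hd; cases PySem.Chars.isdigit c <;> simp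
    rw [collectDigits, dif_pos hi, h]
    simp only [hd', if_true]
    rw [clampLoop]
    have hA : ans2 = ans * 10 + ((c.toNat : Int) - 48) := rfl
    rw [if_neg (by rintro ⟨h1, h2⟩; subst h1; exact hg1 ⟨rfl, by omega⟩),
        if_neg (by rintro ⟨h1, h2⟩; subst h1; exact hg2 ⟨rfl, by omega⟩)]
    exact ih (by omega)

-- ===== VERDICT (by name: the statement is the Claim_ definition above) =====
theorem callingrecu_spec : Claim_equal_callingrecu := by
  intro s i maxi mini ans sign _ hpre
  unfold Spec_callingrecu callingrecu_alt
  exact pv_main s i maxi mini ans sign hpre
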